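-- pv_equiv track=rewrite | github.com/brandonhippe/Advent-of-Code-2025 | python/3.py | part2
-- ===== SOURCE A (Python) =====
-- from typing import Any, List, Optional, Tuple
--
-- def biggest_ix_num(line: str, rem: int) -> Tuple[int, int]:
--     s = slice(-(rem-1)) if rem > 1 else slice(None)
--     return max(enumerate(map(int, line[s])), key=lambda e: e[1])
--
-- def part2(data: List[str]) -> Any:
--     """ 2025 Day 3 Part 2
--     >>> part2(['987654321111111', '811111111111119', '234234234234278', '818181911112111'])
--     3121910778619
--     """
--     count = 0
--     for line in data:
--         num = 0
--         for rem in range(12,0,-1):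
--             ix, digit = biggest_ix_num(line, rem)
--             num = 10 * num + digit
--             line = line[ix+1:]
--         count += num
--
--     return count
-- ===== SOURCE B (Python) =====
-- def part2(data):
--     total = 0
--     for line in data:
--         # best[k] = largest k-digit number formed by a k-digit subsequence of the
--         # suffix of the line scanned so far; -1 while the suffix is shorter than k
--         best = [0] + [-1] * 12
--         for d in map(int, reversed(line)):
--             best = [0] + [
--                 max(best[k], d * 10 ** (k - 1) + best[k - 1]) if best[k - 1] >= 0 else best[k]
--                 for k in range(1, 13)
--             ]
--         total += best[12]
--     return total
-- ===== Notes on version B (the rewrite author's own statement) =====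
-- stated objective: alternative
-- what changed: Replaces A's 12 repeated leftmost-argmax window scans with string re-slicing by a single right-to-left dynamic-programming pass that carries, for each k in 0..12, the largest k-digit subsequence number of the suffix seen so far.
import Mathlib
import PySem

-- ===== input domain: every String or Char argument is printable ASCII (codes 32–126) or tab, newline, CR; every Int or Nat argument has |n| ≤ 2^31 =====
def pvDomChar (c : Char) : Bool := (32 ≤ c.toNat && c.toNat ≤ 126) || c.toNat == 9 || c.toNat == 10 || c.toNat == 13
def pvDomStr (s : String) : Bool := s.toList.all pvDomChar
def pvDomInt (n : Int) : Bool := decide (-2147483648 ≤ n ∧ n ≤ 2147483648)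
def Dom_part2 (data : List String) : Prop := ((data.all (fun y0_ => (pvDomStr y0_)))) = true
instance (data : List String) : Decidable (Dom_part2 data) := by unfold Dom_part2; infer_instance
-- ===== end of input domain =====

-- B replaces A's 12 repeated leftmost-argmax window scans (with string re-slicing) by one
-- right-to-left DP pass carrying, for each k ≤ 12, the largest k-digit subsequence of the suffix.

-- ===== PORT A =====
-- int(c) for a one-character string c
def pvDig? (c : Char) : Option Int := PySem.Int.ofChars? [c]

-- biggest_ix_num(line, rem); Python's lazy map(int, …) is consumed in full by max, so a strict
-- mapM fails (none = ValueError) on exactly the same windows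
def pvBiggestIxNum (line : List Char) (rem : Int) : Option (Int × Int) :=
  let s := if rem > 1 then PySem.List.slice line none (some (-(rem - 1))) else line
  match s.mapM pvDig? with
  | none => none
  | some ds => PySem.List.max? (PySem.List.enumerate ds 0) (fun e => e.2)

-- one iteration of A's inner 'for rem in range(12,0,-1)' loop (none = an exception has occurred)
def pvLoopA (st : Option (Int × List Char)) (rem : Int) : Option (Int × List Char) :=
  match st with
  | none => none
  | some (num, line) =>
    match pvBiggestIxNum line rem with
    | none => none
    | some (ix, digit) => some (10 * num + digit, PySem.List.slice line (some (ix + 1)) none)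

-- after A's rem-loop: count += num (none = Python raised ValueError; excluded by Pre_part2)
def pvFinishA (count : Int) (st : Option (Int × List Char)) : Int :=
  match st with
  | none => count
  | some nl => count + nl.1

-- the body of A's outer 'for line in data' loop: run the rem-loop, then count += num
def pvLineA (count : Int) (line : String) : Int :=
  pvFinishA count ((PySem.List.pyRange 12 0 (-1)).foldl pvLoopA (some ((0 : Int), line.toList)))

def part2 (data : List String) : Int :=
  data.foldl pvLineA 0

-- ===== PORT B =====
-- best = [0] + [max(best[k], d*10**(k-1)+best[k-1]) if best[k-1] >= 0 else best[k] for k in range(1,13)]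
-- (10 ** (k-1) is ported as 10 ^ (k-1).toNat, exact since k ≥ 1 in range(1,13))
def pvStepB (best : List Int) (d : Int) : List Int :=
  0 :: (PySem.List.pyRange 1 13 1).map (fun k =>
    if 0 ≤ PySem.List.pyGetD best (k - 1) 0 then
      max (PySem.List.pyGetD best k 0)
        (d * 10 ^ (k - 1).toNat + PySem.List.pyGetD best (k - 1) 0)
    else PySem.List.pyGetD best k 0)

-- the body of B's 'for line in data' loop: the right-to-left DP pass, then total += best[12]
def pvLineB (total : Int) (line : String) : Int :=
  match line.toList.reverse.mapM pvDig? with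
  | none => total          -- Python raises ValueError here; excluded by Pre_part2
  | some rds =>
      total + PySem.List.pyGetD (rds.foldl pvStepB ((0 : Int) :: List.replicate 12 (-1))) 12 0

def part2_alt (data : List String) : Int :=
  data.foldl pvLineB 0

-- ===== PRECONDITION & SPEC =====
-- A raises ValueError on any line with fewer than 12 characters (max() of an empty window) or
-- with a non-digit character (int() of it); exactly those inputs are excluded.
def Pre_part2 (data : List String) : Prop :=
  ∀ line ∈ data, 12 ≤ line.toList.length ∧ line.toList.all Char.isDigit = true
instance (data : List String) : Decidable (Pre_part2 data) := by unfold Pre_part2; infer_instance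

def pvWitness_part2 : List String := (["987654321111111", "811111111111119"])

def Spec_part2 (data : List String) (out : Int) : Prop := out = part2_alt data
instance (data : List String) (out : Int) : Decidable (Spec_part2 data out) := by unfold Spec_part2; infer_instance

-- ===== CLAIM (what is proved, stated in full; the proofs are below) =====
def Claim_equal_part2 : Prop := ∀ (data : List String), Dom_part2 data → Pre_part2 data → Spec_part2 data (part2 data)

-- ===== LEMMAS AND PROOFS =====

-- the digit value of a digit character
def pvDval (c : Char) : Int := (c.toNat : Int) - 48

-- pvM ds k = the largest integer formed by a k-digit subsequence of ds (-1 if ds is too short);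
-- its recursion is exactly B's DP update
def pvM : List Int → Nat → Int
  | _, 0 => 0
  | [], _ + 1 => -1
  | d :: t, k + 1 =>
    if 0 ≤ pvM t k then max (pvM t (k + 1)) (d * 10 ^ k + pvM t k) else pvM t (k + 1)

-- (index, value) of the FIRST maximal element of a nonempty list (= Python max(enumerate(…)))
def pvArgmax : List Int → Nat × Int
  | [] => (0, 0)
  | [d] => (0, d)
  | d :: e :: t =>
    let q := pvArgmax (e :: t)
    if d < q.2 then (q.1 + 1, q.2) else (0, d)

-- A's greedy loop as a recursion on the remaining pick count
def pvGreedy : Nat → List Int → Int → Int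
  | 0, _, num => num
  | k + 1, ds, num =>
    pvGreedy k (ds.drop ((pvArgmax (ds.take (ds.length - k))).1 + 1))
      (10 * num + (pvArgmax (ds.take (ds.length - k))).2)

-- B's DP state after consuming a suffix
def pvBestVec (ds : List Int) : List Int := (List.range 13).map (pvM ds)

-- the left fold underlying PySem.List.max?, with a forced some accumulator
def pvMFold : Int × Int → List (Int × Int) → Int × Int
  | a, [] => a
  | a, x :: l => pvMFold (if a.2 < x.2 then x else a) l

theorem pvDigitEval (c : Char) (h : c.isDigit = true) :
    PySem.Int.ofChars? [c] = some ((c.toNat : Int) - 48) := by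
  simp only [Char.isDigit, decide_eq_true_eq, Bool.and_eq_true, ge_iff_le] at h
  obtain ⟨h1, h2⟩ := h
  rw [UInt32.le_iff_toNat_le] at h1 h2
  have h1' : 48 ≤ c.toNat := h1
  have h2' : c.toNat ≤ 57 := h2
  have hv : c.toNat = 48 ∨ c.toNat = 49 ∨ c.toNat = 50 ∨ c.toNat = 51 ∨ c.toNat = 52 ∨
      c.toNat = 53 ∨ c.toNat = 54 ∨ c.toNat = 55 ∨ c.toNat = 56 ∨ c.toNat = 57 := by omega
  have hc : ∀ n, c.toNat = n → c = Char.ofNat n := by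
    intro n hn; subst hn; simp [Char.ofNat_toNat]
  rcases hv with h|h|h|h|h|h|h|h|h|h <;> rw [hc _ h] <;> decide


theorem pvDigit_toNat (c : Char) (h : c.isDigit = true) : 48 ≤ c.toNat ∧ c.toNat ≤ 57 := by
  simp only [Char.isDigit, decide_eq_true_eq, Bool.and_eq_true, ge_iff_le] at h
  obtain ⟨h1, h2⟩ := h
  rw [UInt32.le_iff_toNat_le] at h1 h2
  exact ⟨h1, h2⟩


theorem pvMapM_digits (cs : List Char) (h : ∀ c ∈ cs, c.isDigit = true) :
    cs.mapM pvDig? = some (cs.map pvDval) := by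
  induction cs with
  | nil => rfl
  | cons c cs ih =>
    have hc := pvDigitEval c (h c (by simp))
    simp [List.mapM_cons, pvDig?, hc, ih (fun x hx => h x (by simp [hx])), pvDval]


theorem pvM_neg_of_lt (ds : List Int) (k : Nat) (h : ds.length < k) : pvM ds k = -1 := by
  induction ds generalizing k with
  | nil => cases k with
    | zero => simp at h
    | succ k => rfl
  | cons d t ih =>
    cases k with
    | zero => simp at h
    | succ k =>
      have hlt : t.length < k := by simpa using h
      have h1 : pvM t k = -1 := ih k hlt
      have h2 : pvM t (k + 1) = -1 := ih (k + 1) (by omega)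
      simp [pvM, h1, h2]


theorem pvM_nonneg (ds : List Int) (k : Nat) (hd : ∀ x ∈ ds, 0 ≤ x) (h : k ≤ ds.length) :
    0 ≤ pvM ds k := by
  induction ds generalizing k with
  | nil =>
    cases k with
    | zero => simp [pvM]
    | succ k => simp at h
  | cons d t ih =>
    cases k with
    | zero => simp [pvM]
    | succ k =>
      have hk' : k ≤ t.length := by simpa using h
      have h0 : 0 ≤ pvM t k := ih k (fun x hx => hd x (by simp [hx])) hk'
      have hd0 : 0 ≤ d := hd d (by simp)
      have : 0 ≤ d * 10 ^ k + pvM t k := by positivity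
      simp only [pvM, if_pos h0]
      exact le_trans this (le_max_right _ _)


theorem pvM_lt (ds : List Int) (k : Nat) (hd : ∀ x ∈ ds, x ≤ 9) : pvM ds k < 10 ^ k := by
  induction ds generalizing k with
  | nil =>
    cases k with
    | zero => norm_num [pvM]
    | succ k => have : (0:Int) < 10 ^ (k+1) := by positivity
                simpa [pvM] using by linarith
  | cons d t ih =>
    cases k with
    | zero => norm_num [pvM]
    | succ k =>
      have hdt : ∀ x ∈ t, x ≤ 9 := fun x hx => hd x (by simp [hx])
      have h1 : pvM t (k + 1) < 10 ^ (k + 1) := ih (k + 1) hdt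
      have h2 : pvM t k < 10 ^ k := ih k hdt
      have hd9 : d ≤ 9 := hd d (by simp)
      have hP : (0:Int) < 10 ^ k := by positivity
      simp only [pvM]
      split
      · apply max_lt h1
        calc d * 10 ^ k + pvM t k < d * 10 ^ k + 10 ^ k := by linarith
          _ = (d + 1) * 10 ^ k := by ring
          _ ≤ 10 * 10 ^ k := by nlinarith
          _ = 10 ^ (k + 1) := by ring
      · exact h1


theorem pvM_cons_le (d : Int) (t : List Int) (k : Nat) : pvM t k ≤ pvM (d :: t) k := by
  cases k with
  | zero => simp [pvM]
  | succ k =>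
    simp only [pvM]
    split
    · exact le_max_left _ _
    · exact le_refl _


theorem pvM_drop_le (t : List Int) (j k : Nat) : pvM (t.drop j) k ≤ pvM t k := by
  induction t generalizing j with
  | nil => simp
  | cons d t ih =>
    cases j with
    | zero => simp
    | succ j =>
      calc pvM ((d :: t).drop (j + 1)) k = pvM (t.drop j) k := by simp
        _ ≤ pvM t k := ih j
        _ ≤ pvM (d :: t) k := pvM_cons_le d t k


theorem pvArgmax_lt_length (ds : List Int) (h : ds ≠ []) : (pvArgmax ds).1 < ds.length := by
  induction ds with
  | nil => simp at h
  | cons d t ih =>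
    cases t with
    | nil => simp [pvArgmax]
    | cons e t' =>
      have := ih (by simp)
      simp only [pvArgmax]
      split <;> simp_all


-- the greedy step: the first pick of the largest (k+1)-digit subsequence is the first maximum
-- of the window that leaves k digits after it
theorem pvM_greedy (k : Nat) (ds : List Int) (hd : ∀ x ∈ ds, 0 ≤ x ∧ x ≤ 9)
    (hk : k + 1 ≤ ds.length) :
    pvM ds (k + 1) = (pvArgmax (ds.take (ds.length - k))).2 * 10 ^ k +
      pvM (ds.drop ((pvArgmax (ds.take (ds.length - k))).1 + 1)) k := by
  induction ds with
  | nil => simp at hk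
  | cons d t ih =>
    have hd' : ∀ x ∈ t, 0 ≤ x ∧ x ≤ 9 := fun x hx => hd x (by simp [hx])
    have hdd := hd d (by simp)
    have hkt : k ≤ t.length := by simpa using hk
    have hw : (d :: t).take ((d :: t).length - k) = d :: t.take (t.length - k) := by
      rw [List.length_cons, show t.length + 1 - k = (t.length - k) + 1 by omega, List.take_succ_cons]
    have h0 : 0 ≤ pvM t k := pvM_nonneg t k (fun x hx => (hd' x hx).1) hkt
    have hP : (0:Int) < 10 ^ k := by positivity
    by_cases hnk : t.length = k
    · -- the window is the single digit d
      rw [hw, show t.length - k = 0 by omega, List.take_zero]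
      have hneg : pvM t (k + 1) = -1 := pvM_neg_of_lt t (k + 1) (by omega)
      have hx : 0 ≤ d * 10 ^ k + pvM t k := by
        have : 0 ≤ d * 10 ^ k := mul_nonneg hdd.1 (le_of_lt hP)
        linarith
      simp only [pvArgmax, pvM, if_pos h0, hneg, List.drop_succ_cons, List.drop_zero]
      exact max_eq_right (by linarith)
    · -- the window extends into t; compare d with the first maximum of t's window
      have hlen : 0 < t.length - k := by omega
      have hwne : t.take (t.length - k) ≠ [] := by
        apply List.ne_nil_of_length_pos
        rw [List.length_take]
        omega
      obtain ⟨e, t', het⟩ := List.exists_cons_of_ne_nil hwne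
      set q := pvArgmax (t.take (t.length - k)) with hqdef
      have hih := ih hd' (by omega)
      have hq1 : q.1 < t.length - k := by
        have := pvArgmax_lt_length _ hwne
        rwa [List.length_take, min_eq_left (by omega)] at this
      have hX0 : 0 ≤ pvM (t.drop (q.1 + 1)) k := by
        apply pvM_nonneg _ _ (fun x hx => (hd' x (List.drop_subset _ _ hx)).1)
        rw [List.length_drop]
        omega
      have hlt : pvM t k < 10 ^ k := pvM_lt t k (fun x hx => (hd' x hx).2)
      rw [hw, het]
      have hargs : pvArgmax (d :: e :: t') =
          if d < q.2 then (q.1 + 1, q.2) else (0, d) := by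
        rw [hqdef, het]
        rfl
      rw [hargs]
      by_cases hc : d < q.2
      · rw [if_pos hc]
        have hle : d * 10 ^ k + pvM t k ≤ pvM t (k + 1) := by
          rw [hih]
          nlinarith
        simp only [pvM, if_pos h0, List.drop_succ_cons]
        rw [max_eq_left hle, hih]
      · rw [if_neg hc]
        push Not at hc
        have hdrop : pvM (t.drop (q.1 + 1)) k ≤ pvM t k := pvM_drop_le t (q.1 + 1) k
        have hle : pvM t (k + 1) ≤ d * 10 ^ k + pvM t k := by
          rw [hih]
          nlinarith
        simp only [pvM, if_pos h0, List.drop_succ_cons, List.drop_zero]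
        rw [max_eq_right hle]


theorem pvGreedy_eq_pvM (k : Nat) (ds : List Int) (num : Int)
    (hd : ∀ x ∈ ds, 0 ≤ x ∧ x ≤ 9) (hk : k ≤ ds.length) :
    pvGreedy k ds num = num * 10 ^ k + pvM ds k := by
  induction k generalizing ds num with
  | zero => simp [pvGreedy, pvM]
  | succ k ih =>
    have hwne : ds.take (ds.length - k) ≠ [] := by
      apply List.ne_nil_of_length_pos
      rw [List.length_take]
      omega
    have hq1 : (pvArgmax (ds.take (ds.length - k))).1 < ds.length - k := by
      have := pvArgmax_lt_length _ hwne
      rwa [List.length_take, min_eq_left (by omega)] at this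
    rw [pvGreedy, ih _ _ (fun x hx => hd x (List.drop_subset _ _ hx))
      (by rw [List.length_drop]; omega)]
    rw [pvM_greedy k ds hd hk]
    ring


theorem pvMax?_cons : ∀ (l : List (Int × Int)) (x : Int × Int),
    PySem.List.max? (x :: l) (fun e => e.2) = some (pvMFold x l) := by
  intro l
  induction l with
  | nil => intro x; simp [PySem.List.max?, pvMFold]
  | cons y l ih =>
    intro x
    have h1 : PySem.List.max? (x :: y :: l) (fun e : Int × Int => e.2) =
        PySem.List.max? ((if x.2 < y.2 then y else x) :: l) (fun e : Int × Int => e.2) := by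
      simp only [PySem.List.max?, List.foldl_cons]
      congr 1
      split_ifs <;> simp
    rw [h1, ih]
    rfl


theorem pvMFold_enumerate (t : List Int) (a : Int × Int) (s : Int) :
    pvMFold a (PySem.List.enumerate t s) =
      if t ≠ [] ∧ a.2 < (pvArgmax t).2 then (s + ((pvArgmax t).1 : Int), (pvArgmax t).2)
      else a := by
  induction t generalizing a s with
  | nil => simp [PySem.List.enumerate_nil, pvMFold]
  | cons e t' ih =>
    rw [PySem.List.enumerate_cons]
    show pvMFold (if a.2 < e then (s, e) else a) (PySem.List.enumerate t' (s + 1)) = _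
    rw [ih]
    cases t' with
    | nil =>
      simp only [pvArgmax, ne_eq, not_true_eq_false, false_and, if_false]
      split_ifs with h1 h2 h2 <;> simp_all
    | cons f t'' =>
      simp only [pvArgmax, ne_eq]
      set r := pvArgmax (f :: t'') with hr
      split_ifs with h1 h2 h3 h4 h5 h6 h7 h8 <;> simp_all [Prod.ext_iff] <;> omega


theorem pvMax?_enumerate (ds : List Int) (hne : ds ≠ []) :
    PySem.List.max? (PySem.List.enumerate ds 0) (fun e => e.2) =
      some (((pvArgmax ds).1 : Int), (pvArgmax ds).2) := by
  obtain ⟨d, t, rfl⟩ := List.exists_cons_of_ne_nil hne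
  rw [PySem.List.enumerate_cons]
  rw [show (0:Int) + 1 = 1 by norm_num]
  rw [pvMax?_cons (PySem.List.enumerate t 1) (0, d), pvMFold_enumerate t (0, d) 1]
  cases t with
  | nil => simp [pvArgmax]
  | cons e t' =>
    simp only [pvArgmax, ne_eq, reduceCtorEq, not_false_eq_true, true_and]
    set r := pvArgmax (e :: t') with hr
    split_ifs with h1 <;> simp [Prod.ext_iff]
    omega


theorem pvPyRange_down_succ (k : Nat) :
    PySem.List.pyRange ((k : Int) + 1) 0 (-1) = ((k : Int) + 1) :: PySem.List.pyRange (k : Int) 0 (-1) := by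
  by_cases hk0 : k = 0
  · subst hk0; decide
  · simp only [PySem.List.pyRange]
    norm_num
    rw [if_pos (by exact_mod_cast Nat.pos_of_ne_zero hk0)]
    rw [List.range_succ_eq_map, List.map_cons, List.map_map]
    norm_num


theorem pvLoopA_run (k : Nat) (cs : List Char) (num : Int)
    (hd : ∀ c ∈ cs, c.isDigit = true) (hk : k ≤ cs.length) :
    ∃ cs', (PySem.List.pyRange (k : Int) 0 (-1)).foldl pvLoopA (some (num, cs)) =
      some (pvGreedy k (cs.map pvDval) num, cs') := by
  induction k generalizing cs num with
  | zero =>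
    refine ⟨cs, ?_⟩
    rw [show ((0:Nat):Int) = 0 by norm_num, show PySem.List.pyRange 0 0 (-1) = [] from rfl]
    rfl
  | succ k ih =>
    rw [show (((k+1:Nat)):Int) = (k:Int) + 1 by push_cast; ring, pvPyRange_down_succ k,
      List.foldl_cons]
    -- evaluate one iteration of A's loop
    have hs : (if ((k:Int) + 1) > 1
        then PySem.List.slice cs none (some (-(((k:Int) + 1) - 1))) else cs) =
        cs.take (cs.length - k) := by
      by_cases hk0 : k = 0
      · subst hk0
        norm_num [List.take_length]
      · rw [if_pos (by exact_mod_cast Nat.lt_add_of_pos_left (Nat.pos_of_ne_zero hk0)),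
          show ((k:Int) + 1) - 1 = ((k:Nat):Int) by ring,
          PySem.List.slice_to_neg_natCast cs k (Nat.pos_of_ne_zero hk0)]
    have hmm : (cs.take (cs.length - k)).mapM pvDig? =
        some ((cs.map pvDval).take (cs.length - k)) := by
      rw [pvMapM_digits _ (fun c hc => hd c (List.take_subset _ _ hc)), List.map_take]
    have hwne : (cs.map pvDval).take (cs.length - k) ≠ [] := by
      apply List.ne_nil_of_length_pos
      rw [List.length_take, List.length_map]
      omega
    set q := pvArgmax ((cs.map pvDval).take (cs.length - k)) with hqdef
    have hq1 : q.1 < cs.length - k := by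
      have := pvArgmax_lt_length _ hwne
      rwa [List.length_take, List.length_map, min_eq_left (by omega)] at this
    have hstep : pvLoopA (some (num, cs)) ((k:Int) + 1) =
        some (10 * num + q.2, cs.drop (q.1 + 1)) := by
      simp only [pvLoopA, pvBiggestIxNum, hs, hmm, pvMax?_enumerate _ hwne, ← hqdef]
      rw [show ((q.1:Int) + 1) = (((q.1 + 1 : Nat)):Int) by push_cast; ring,
        PySem.List.slice_from_natCast]
    rw [hstep]
    obtain ⟨cs', hcs'⟩ := ih (cs.drop (q.1 + 1)) (10 * num + q.2)
      (fun c hc => hd c (List.drop_subset _ _ hc)) (by rw [List.length_drop]; omega)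
    refine ⟨cs', ?_⟩
    rw [hcs', pvGreedy, List.length_map, ← hqdef, List.map_drop]


theorem pvStepB_bestVec (t : List Int) (d : Int) : pvStepB (pvBestVec t) d = pvBestVec (d :: t) := by
  have hr : PySem.List.pyRange 1 13 1 = [1,2,3,4,5,6,7,8,9,10,11,12] := by decide
  rw [pvStepB, hr]
  simp only [List.map_cons, List.map_nil]
  norm_num [PySem.List.pyGetD_ofNat', pvBestVec, List.getD_eq_getElem?_getD,
    List.getElem?_map, List.getElem?_range]
  show _ = (List.range 13).map (pvM (d :: t))
  rw [show List.range 13 = [0,1,2,3,4,5,6,7,8,9,10,11,12] by rfl]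
  simp only [List.map_cons, List.map_nil, pvM]
  norm_num [show Int.toNat 2 = 2 from rfl, show Int.toNat 3 = 3 from rfl,
    show Int.toNat 4 = 4 from rfl, show Int.toNat 5 = 5 from rfl, show Int.toNat 6 = 6 from rfl,
    show Int.toNat 7 = 7 from rfl, show Int.toNat 8 = 8 from rfl, show Int.toNat 9 = 9 from rfl,
    show Int.toNat 10 = 10 from rfl, show Int.toNat 11 = 11 from rfl]

theorem pvFoldB (rds t : List Int) :
    rds.foldl pvStepB (pvBestVec t) = pvBestVec (rds.reverse ++ t) := by
  induction rds generalizing t with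
  | nil => simp
  | cons d rds ih =>
    rw [List.foldl_cons, pvStepB_bestVec, ih (d :: t)]
    simp


theorem pvDval_bounds (cs : List Char) (h : ∀ c ∈ cs, c.isDigit = true) :
    ∀ x ∈ cs.map pvDval, 0 ≤ x ∧ x ≤ 9 := by
  intro x hx
  obtain ⟨c, hc, rfl⟩ := List.mem_map.1 hx
  have := pvDigit_toNat c (h c hc)
  unfold pvDval
  omega

theorem pvBestVec_getD12 (ds : List Int) :
    PySem.List.pyGetD (pvBestVec ds) 12 0 = pvM ds 12 := by
  rw [PySem.List.pyGetD_ofNat']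
  simp [pvBestVec, List.getD_eq_getElem?_getD]

-- ===== VERDICT (by name: the statement is the Claim_ definition above) =====
theorem part2_spec : Claim_equal_part2 := by
  intro data _hdom hpre
  have hA : ∀ (acc : Int), ∀ line ∈ data,
      pvLineA acc line = acc + pvM (line.toList.map pvDval) 12 := by
    intro acc line hmem
    obtain ⟨hlen, hdig⟩ := hpre line hmem
    have hdig' : ∀ c ∈ line.toList, c.isDigit = true := by
      intro c hc
      exact List.all_eq_true.1 hdig c hc
    obtain ⟨cs', hrun⟩ := pvLoopA_run 12 line.toList 0 hdig' hlen
    rw [pvLineA, show (12:Int) = ((12:Nat):Int) by norm_num]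
    rw [hrun]
    simp only [pvFinishA]
    rw [pvGreedy_eq_pvM 12 _ 0 (pvDval_bounds _ hdig') (by rw [List.length_map]; omega)]
    norm_num
  have hB : ∀ (acc : Int), ∀ line ∈ data,
      pvLineB acc line = acc + pvM (line.toList.map pvDval) 12 := by
    intro acc line hmem
    obtain ⟨hlen, hdig⟩ := hpre line hmem
    have hdig' : ∀ c ∈ line.toList, c.isDigit = true := by
      intro c hc
      exact List.all_eq_true.1 hdig c hc
    have hrev : line.toList.reverse.mapM pvDig? =
        some ((line.toList.map pvDval).reverse) := by
      rw [pvMapM_digits _ (fun c hc => hdig' c (List.mem_reverse.1 hc)), List.map_reverse]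
    simp only [pvLineB, hrev]
    rw [show ((0:Int) :: List.replicate 12 (-1)) = pvBestVec [] by decide,
      pvFoldB, List.reverse_reverse, List.append_nil, pvBestVec_getD12]
  show part2 data = part2_alt data
  unfold part2 part2_alt
  rw [PySem.List.foldl_congr_mem data pvLineA
        (fun acc line => acc + pvM (line.toList.map pvDval) 12) 0 hA,
      PySem.List.foldl_congr_mem data pvLineB
        (fun acc line => acc + pvM (line.toList.map pvDval) 12) 0 hB]
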